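-- pv_equiv track=rewrite | github.com/KRMed/Calighter-ML-Training | scripts/validation/create_error_report.py | analyze_entity_coverage
-- ===== SOURCE A (Python) =====
-- from typing import List, Dict, Tuple
--
-- def analyze_entity_coverage(data: List[Dict]) -> Dict[str, Dict[str, int]]:
--     """Analyze entity coverage (B- and I- tags) for each entity type."""
--     entity_stats = {}
--
--     for entry in data:
--         tags = entry.get("tags", [])
--         for tag in tags:
--             if tag.startswith(('B-', 'I-')):
--                 entity_type = tag[2:]  # Remove B- or I- prefix
--                 tag_type = tag[0]      # B or I
--
--                 if entity_type not in entity_stats: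
--                     entity_stats[entity_type] = {'B': 0, 'I': 0, 'total': 0}
--
--                 entity_stats[entity_type][tag_type] += 1
--                 entity_stats[entity_type]['total'] += 1
--
--     return entity_stats
-- ===== SOURCE B (Python) =====
-- from typing import List, Dict, Tuple
--
-- def analyze_entity_coverage(data: List[Dict]) -> Dict[str, Dict[str, int]]:
--     """Analyze entity coverage (B- and I- tags) for each entity type.
--
--     Two phases: one flat counting pass over all tags keyed by
--     (entity_type, prefix), then a reshape pass that assembles each
--     nested dict, deriving 'total' arithmetically.
--     """
--     counts = {}
--     for entry in data:
--         for tag in entry.get("tags", []):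
--             if tag[:2] in ('B-', 'I-'):
--                 key = (tag[2:], tag[0])
--                 counts[key] = counts.get(key, 0) + 1
--     types = list(dict.fromkeys(t for (t, _) in counts))
--     return {t: {'B': counts.get((t, 'B'), 0),
--                 'I': counts.get((t, 'I'), 0),
--                 'total': counts.get((t, 'B'), 0) + counts.get((t, 'I'), 0)}
--             for t in types}
-- ===== Notes on version B (the rewrite author's own statement) =====
-- stated objective: idiomatic
-- what changed: Replaces A's incremental nested-dict mutation (create-if-missing, then two in-place increments per tag) by two distinct phases: a flat counting pass keyed by (entity_type, prefix) tuples, then a reshape pass that assembles each nested dict and derives 'total' arithmetically instead of accumulating it.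
import Mathlib
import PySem

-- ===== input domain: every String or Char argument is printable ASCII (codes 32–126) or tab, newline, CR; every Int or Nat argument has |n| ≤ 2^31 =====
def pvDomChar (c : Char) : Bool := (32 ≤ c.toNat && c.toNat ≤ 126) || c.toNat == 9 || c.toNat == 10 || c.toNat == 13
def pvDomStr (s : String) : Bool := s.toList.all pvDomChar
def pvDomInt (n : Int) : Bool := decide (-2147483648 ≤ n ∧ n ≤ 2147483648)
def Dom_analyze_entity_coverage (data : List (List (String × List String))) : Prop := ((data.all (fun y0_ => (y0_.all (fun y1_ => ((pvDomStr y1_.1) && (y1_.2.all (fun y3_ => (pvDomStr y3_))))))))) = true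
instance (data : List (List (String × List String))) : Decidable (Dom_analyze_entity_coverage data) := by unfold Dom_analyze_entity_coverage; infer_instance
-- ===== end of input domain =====

-- B replaces A's incremental nested-dict mutation by a flat counting pass keyed by
-- (entity_type, prefix) pairs followed by a separate reshape pass that derives 'total'
-- arithmetically (objective: idiomatic; same asymptotic cost).

-- ===== PORT A =====
-- per-tag loop body of A: create-if-missing, then two in-place increments
-- (Python's `entity_stats[et][tt] += 1` read-modify-write is ported as overwrite-in-place
--  insert; the `none => ""` arm of tag[0] is unreachable under the startswith guard)
def pvATag (st : PySem.Dict String (PySem.Dict String Int)) (tag : String) :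
    PySem.Dict String (PySem.Dict String Int) :=
  if PySem.Str.startswith tag "B-" || PySem.Str.startswith tag "I-" then
    let entity_type := PySem.Str.slice tag (some 2) none
    let tag_type := match PySem.Str.pyGet? tag 0 with | some c => String.ofList [c] | none => ""
    let st := if st.contains entity_type then st
              else st.insert entity_type (PySem.Dict.ofList [("B", 0), ("I", 0), ("total", 0)])
    let st := st.insert entity_type
      ((st.getD entity_type PySem.Dict.empty).insert tag_type
        ((st.getD entity_type PySem.Dict.empty).getD tag_type 0 + 1))
    st.insert entity_type
      ((st.getD entity_type PySem.Dict.empty).insert "total"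
        ((st.getD entity_type PySem.Dict.empty).getD "total" 0 + 1))
  else st

def analyze_entity_coverage (data : List (List (String × List String))) :
    List (String × List (String × Int)) :=
  (data.foldl (fun st entry => ((PySem.Dict.mk entry).getD "tags" []).foldl pvATag st)
    PySem.Dict.empty).items.map (fun p => (p.1, p.2.items))

-- ===== PORT B =====
-- per-tag loop body of B: one flat counter keyed by (tag[2:], tag[0])
def pvBTag (c : PySem.Dict (String × String) Int) (tag : String) :
    PySem.Dict (String × String) Int :=
  if PySem.Str.slice tag none (some 2) == "B-" || PySem.Str.slice tag none (some 2) == "I-" then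
    let key := (PySem.Str.slice tag (some 2) none,
                match PySem.Str.pyGet? tag 0 with | some c0 => String.ofList [c0] | none => "")
    c.insert key (c.getD key 0 + 1)
  else c

def analyze_entity_coverage_alt (data : List (List (String × List String))) :
    List (String × List (String × Int)) :=
  let counts := data.foldl (fun c entry => ((PySem.Dict.mk entry).getD "tags" []).foldl pvBTag c)
    PySem.Dict.empty
  let types := PySem.List.dedup (counts.keys.map (·.1))
  types.map (fun t =>
    (t, [("B", counts.getD (t, "B") 0), ("I", counts.getD (t, "I") 0),
         ("total", counts.getD (t, "B") 0 + counts.getD (t, "I") 0)]))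

-- ===== PRECONDITION & SPEC =====
def Spec_analyze_entity_coverage (data : List (List (String × List String))) (out : List (String × List (String × Int))) : Prop := out = analyze_entity_coverage_alt data
instance (data : List (List (String × List String))) (out : List (String × List (String × Int))) : Decidable (Spec_analyze_entity_coverage data out) := by unfold Spec_analyze_entity_coverage; infer_instance

-- ===== CLAIM (what is proved, stated in full; the proofs are below) =====
def Claim_equal_analyze_entity_coverage : Prop := ∀ (data : List (List (String × List String))), Dom_analyze_entity_coverage data → Spec_analyze_entity_coverage data (analyze_entity_coverage data)

-- ===== LEMMAS AND PROOFS =====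

-- the (entity_type, tag_type) pair a tag contributes, if any
def pvEnt (tag : String) : Option (String × String) :=
  if PySem.Str.startswith tag "B-" || PySem.Str.startswith tag "I-" then
    some (PySem.Str.slice tag (some 2) none,
          match PySem.Str.pyGet? tag 0 with | some c => String.ofList [c] | none => "")
  else none

-- closed form of A's nested stats dict after the contribution list `ents`
def pvInner (ents : List (String × String)) (t : String) : PySem.Dict String Int :=
  PySem.Dict.mk [("B", (ents.count (t, "B") : Int)), ("I", (ents.count (t, "I") : Int)),
                 ("total", (ents.count (t, "B") : Int) + (ents.count (t, "I") : Int))]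

def pvStats (ents : List (String × String)) : PySem.Dict String (PySem.Dict String Int) :=
  PySem.Dict.mk ((PySem.List.dedup (ents.map (·.1))).map (fun t => (t, pvInner ents t)))

lemma pv_dedup_eq_ofList {α : Type} [BEq α] (l : List α) :
    PySem.List.dedup l = PySem.Set.ofList l := rfl

lemma pv_mem_dedup {l : List String} {x : String} : x ∈ PySem.List.dedup l ↔ x ∈ l :=
  PySem.Set.mem_ofList l x

lemma pv_nodup_dedup (l : List String) : (PySem.List.dedup l).Nodup := PySem.Set.nodup_ofList l

lemma pvStats_keys (ents : List (String × String)) :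
    (pvStats ents).keys = PySem.List.dedup (ents.map (·.1)) := by
  simp [pvStats, PySem.Dict.keys]
  exact List.map_id'' (fun x => rfl) _

lemma pvStats_contains (ents : List (String × String)) (et : String) :
    (pvStats ents).contains et = decide (et ∈ ents.map (·.1)) := by
  rw [PySem.Dict.contains_eq_decide_mem_keys, pvStats_keys]
  simp [PySem.Set.mem_ofList]

lemma pvStats_getD (ents : List (String × String)) {et : String}
    (h : et ∈ ents.map (·.1)) :
    (pvStats ents).getD et PySem.Dict.empty = pvInner ents et := by
  apply PySem.Dict.getD_of_mem_items
  · exact List.mem_map_of_mem (pv_mem_dedup.mpr h)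
  · rw [pvStats_keys]; exact pv_nodup_dedup _

lemma pv_triple_insert (a b c v : Int) (k : String) :
    (k = "B" → (PySem.Dict.mk [("B",a),("I",b),("total",c)]).insert k v
      = PySem.Dict.mk [("B",v),("I",b),("total",c)]) ∧
    (k = "I" → (PySem.Dict.mk [("B",a),("I",b),("total",c)]).insert k v
      = PySem.Dict.mk [("B",a),("I",v),("total",c)]) ∧
    (k = "total" → (PySem.Dict.mk [("B",a),("I",b),("total",c)]).insert k v
      = PySem.Dict.mk [("B",a),("I",b),("total",v)]) := by
  refine ⟨fun hk => ?_, fun hk => ?_, fun hk => ?_⟩ <;>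
    (subst hk; apply PySem.Dict.ext; simp [PySem.Dict.items_insert])

lemma pv_triple_getD (a b c : Int) :
    (PySem.Dict.mk [("B",a),("I",b),("total",c)]).getD "total" 0 = c ∧
    (PySem.Dict.mk [("B",a),("I",b),("total",c)]).getD "B" 0 = a ∧
    (PySem.Dict.mk [("B",a),("I",b),("total",c)]).getD "I" 0 = b := by
  refine ⟨?_, ?_, ?_⟩ <;> simp [PySem.Dict.getD_eq_get?_getD, PySem.Dict.get?_mk_cons]

lemma pvInner_append_ne (ents : List (String × String)) (e : String × String) (t : String)
    (h : t ≠ e.1) : pvInner (ents ++ [e]) t = pvInner ents t := by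
  have hB : List.count (t, "B") (ents ++ [e]) = List.count (t, "B") ents := by
    rw [List.count_append]
    have : e ≠ (t, "B") := fun hx => h (by rw [hx])
    simp [this]
  have hI : List.count (t, "I") (ents ++ [e]) = List.count (t, "I") ents := by
    rw [List.count_append]
    have : e ≠ (t, "I") := fun hx => h (by rw [hx])
    simp [this]
  simp [pvInner, hB, hI]

lemma pvStats_append_mem (ents : List (String × String)) (e : String × String)
    (hmem : e.1 ∈ ents.map (·.1)) :
    pvStats (ents ++ [e]) = (pvStats ents).insert e.1 (pvInner (ents ++ [e]) e.1) := by
  have hc : (pvStats ents).contains e.1 = true := by simp [pvStats_contains, hmem]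
  apply PySem.Dict.ext
  rw [PySem.Dict.items_insert_of_contains _ _ hc]
  show _ = ((PySem.List.dedup (ents.map (·.1))).map (fun t => (t, pvInner ents t))).map _
  rw [List.map_map]
  have hded : PySem.List.dedup ((ents ++ [e]).map (·.1)) = PySem.List.dedup (ents.map (·.1)) := by
    rw [List.map_append, List.map_singleton, pv_dedup_eq_ofList, pv_dedup_eq_ofList,
        PySem.Set.ofList_append_singleton,
        PySem.Set.add_of_mem (by rwa [PySem.Set.mem_ofList])]
  show (PySem.List.dedup ((ents ++ [e]).map (·.1))).map _ = _
  rw [hded]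
  apply List.map_congr_left
  intro t ht
  by_cases hte : t = e.1
  · subst hte; simp
  · simp only [Function.comp_apply]
    rw [if_neg (by simpa using hte), pvInner_append_ne ents e t hte]

lemma pvStats_append_not_mem (ents : List (String × String)) (e : String × String)
    (hmem : e.1 ∉ ents.map (·.1)) :
    pvStats (ents ++ [e]) = (pvStats ents).insert e.1 (pvInner (ents ++ [e]) e.1) := by
  have hc : (pvStats ents).contains e.1 = false := by simp [pvStats_contains, hmem]
  apply PySem.Dict.ext
  rw [PySem.Dict.items_insert_of_not_contains _ _ hc]
  show (PySem.List.dedup ((ents ++ [e]).map (·.1))).map _ = _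
  have hded : PySem.List.dedup ((ents ++ [e]).map (·.1))
      = PySem.List.dedup (ents.map (·.1)) ++ [e.1] := by
    rw [List.map_append, List.map_singleton, pv_dedup_eq_ofList, pv_dedup_eq_ofList,
        PySem.Set.ofList_append_singleton,
        PySem.Set.add_of_not_mem (by rwa [PySem.Set.mem_ofList])]
  rw [hded, List.map_append, List.map_singleton]
  congr 1
  apply List.map_congr_left
  intro t ht
  have hte : t ≠ e.1 := fun hx => hmem (hx ▸ (pv_mem_dedup.mp ht))
  rw [pvInner_append_ne ents e t hte]

lemma pvStats_step (ents : List (String × String)) (et tt : String)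
    (htt : tt = "B" ∨ tt = "I") :
    (let st := if (pvStats ents).contains et then pvStats ents
               else (pvStats ents).insert et (PySem.Dict.ofList [("B", 0), ("I", 0), ("total", 0)])
     let st := st.insert et
       ((st.getD et PySem.Dict.empty).insert tt ((st.getD et PySem.Dict.empty).getD tt 0 + 1))
     st.insert et
       ((st.getD et PySem.Dict.empty).insert "total"
         ((st.getD et PySem.Dict.empty).getD "total" 0 + 1))) =
    pvStats (ents ++ [(et, tt)]) := by
  by_cases hmem : et ∈ ents.map (·.1)
  case pos =>
    have hgd : (pvStats ents).getD et PySem.Dict.empty = pvInner ents et := pvStats_getD ents hmem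
    have hc : (pvStats ents).contains et = true := by simp [pvStats_contains, hmem]
    simp only [hc, if_true, hgd, PySem.Dict.getD_insert_self, PySem.Dict.insert_insert_self]
    rw [pvStats_append_mem ents (et, tt) hmem]
    congr 1
    rcases htt with h | h <;> subst h
    · simp only [pvInner]
      rw [(pv_triple_getD _ _ _).2.1, ((pv_triple_insert _ _ _ _ "B").1 rfl),
          (pv_triple_getD _ _ _).1, ((pv_triple_insert _ _ _ _ "total").2.2 rfl)]
      simp [List.count_append]
      omega
    · simp only [pvInner]
      rw [(pv_triple_getD _ _ _).2.2, ((pv_triple_insert _ _ _ _ "I").2.1 rfl),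
          (pv_triple_getD _ _ _).1, ((pv_triple_insert _ _ _ _ "total").2.2 rfl)]
      simp [List.count_append]
      omega
  case neg =>
    have hc : (pvStats ents).contains et = false := by simp [pvStats_contains, hmem]
    have hcnt : ∀ x : String, List.count (et, x) ents = 0 := by
      intro x
      rw [List.count_eq_zero]
      exact fun hx => hmem (List.mem_map_of_mem hx)
    simp only [hc, Bool.false_eq_true, if_false, PySem.Dict.getD_insert_self,
      PySem.Dict.insert_insert_self]
    rw [pvStats_append_not_mem ents (et, tt) hmem]
    congr 1
    have hofl : PySem.Dict.ofList [("B", (0:Int)), ("I", 0), ("total", 0)]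
        = PySem.Dict.mk [("B", 0), ("I", 0), ("total", 0)] := rfl
    rcases htt with h | h <;> subst h
    · rw [hofl, (pv_triple_getD _ _ _).2.1, ((pv_triple_insert _ _ _ _ "B").1 rfl),
          (pv_triple_getD _ _ _).1, ((pv_triple_insert _ _ _ _ "total").2.2 rfl)]
      simp [pvInner, List.count_append, hcnt]
    · rw [hofl, (pv_triple_getD _ _ _).2.2, ((pv_triple_insert _ _ _ _ "I").2.1 rfl),
          (pv_triple_getD _ _ _).1, ((pv_triple_insert _ _ _ _ "total").2.2 rfl)]
      simp [pvInner, List.count_append, hcnt]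

lemma pv_startswith_shape {tag p : String} (h : PySem.Str.startswith tag p = true) :
    ∃ r, tag.toList = p.toList ++ r := by
  rw [PySem.Str.startswith_eq, PySem.Chars.startswith_iff] at h
  obtain ⟨r, hr⟩ := h
  exact ⟨r, hr.symm⟩

lemma pvATag_closed (ents : List (String × String)) (tag : String) :
    pvATag (pvStats ents) tag = pvStats (ents ++ (pvEnt tag).toList) := by
  unfold pvATag pvEnt
  by_cases hg : (PySem.Str.startswith tag "B-" || PySem.Str.startswith tag "I-") = true
  · rw [if_pos hg, if_pos hg, Option.toList_some]
    rcases (Bool.or_eq_true _ _).mp hg with h | h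
    · obtain ⟨r, hr⟩ := pv_startswith_shape h
      have hc : PySem.Str.pyGet? tag 0 = some 'B' := by simp [hr]
      exact pvStats_step ents _ _ (Or.inl (by rw [hc]))
    · obtain ⟨r, hr⟩ := pv_startswith_shape h
      have hc : PySem.Str.pyGet? tag 0 = some 'I' := by simp [hr]
      exact pvStats_step ents _ _ (Or.inr (by rw [hc]))
  · rw [if_neg hg, if_neg hg]
    simp

lemma pvA_fold (ts : List String) :
    ts.foldl pvATag PySem.Dict.empty = pvStats (ts.filterMap pvEnt) := by
  induction ts using List.reverseRecOn with
  | nil => rfl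
  | append_singleton ts t ih =>
    rw [List.foldl_append, List.foldl_cons, List.foldl_nil, ih, pvATag_closed,
        List.filterMap_append]
    cases h : pvEnt t <;> simp [h]

lemma pv_guard (tag : String) (p : String) (hp : p.toList.length = 2) :
    (PySem.Str.slice tag none (some 2) == p) = PySem.Str.startswith tag p := by
  have hs : PySem.List.slice tag.toList none (some (2:Int)) = tag.toList.take 2 := by
    have := PySem.List.slice_to (xs := tag.toList) (b := 2) (by omega)
    simpa using this
  rw [Bool.eq_iff_iff, beq_iff_eq, PySem.Str.startswith_eq, PySem.Chars.startswith_iff,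
      ← String.toList_inj, PySem.Str.toList_slice, PySem.Chars.slice_eq_listSlice, hs,
      List.prefix_iff_eq_take, hp]
  exact eq_comm

lemma pvBTag_closed (c : PySem.Dict (String × String) Int) (tag : String) :
    pvBTag c tag = match pvEnt tag with
      | some e => c.insert e (c.getD e 0 + 1)
      | none => c := by
  unfold pvBTag pvEnt
  rw [pv_guard tag "B-" (by decide), pv_guard tag "I-" (by decide)]
  split <;> rfl

lemma pvB_fold_aux (ts : List String) (c : PySem.Dict (String × String) Int) :
    ts.foldl pvBTag c =
      (ts.filterMap pvEnt).foldl (fun c e => c.insert e (c.getD e 0 + 1)) c := by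
  induction ts generalizing c with
  | nil => rfl
  | cons t ts ih =>
    rw [List.foldl_cons, List.filterMap_cons, pvBTag_closed]
    cases h : pvEnt t with
    | none => simp [ih]
    | some e => simp [ih]

lemma pvB_fold (ts : List String) :
    ts.foldl pvBTag PySem.Dict.empty = PySem.Dict.counter (ts.filterMap pvEnt) := by
  rw [pvB_fold_aux, PySem.Dict.foldl_insert_getD_add_one_eq_counter]

lemma pv_ofList_map {α β : Type} [BEq α] [LawfulBEq α] [BEq β] [LawfulBEq β]
    (l : List α) (f : α → β) :
    PySem.Set.ofList ((PySem.Set.ofList l).map f) = PySem.Set.ofList (l.map f) := by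
  induction l using List.reverseRecOn with
  | nil => rfl
  | append_singleton l x ih =>
    rw [List.map_append, List.map_singleton, PySem.Set.ofList_append_singleton,
        PySem.Set.ofList_append_singleton]
    by_cases hx : x ∈ PySem.Set.ofList l
    · rw [PySem.Set.add_of_mem hx, ih]
      have hfx : f x ∈ PySem.Set.ofList (l.map f) := by
        rw [PySem.Set.mem_ofList]
        exact List.mem_map_of_mem ((PySem.Set.mem_ofList l x).mp hx)
      rw [PySem.Set.add_of_mem hfx]
    · rw [PySem.Set.add_of_not_mem hx, List.map_append, List.map_singleton,
          PySem.Set.ofList_append_singleton, ih]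

-- ===== VERDICT (by name: the statement is the Claim_ definition above) =====
theorem analyze_entity_coverage_spec : Claim_equal_analyze_entity_coverage := by
  intro data _
  unfold Spec_analyze_entity_coverage analyze_entity_coverage analyze_entity_coverage_alt
  dsimp only
  rw [← List.foldl_flatMap, ← List.foldl_flatMap, pvA_fold, pvB_fold,
      PySem.Dict.keys_counter]
  rw [pv_dedup_eq_ofList ((PySem.Set.ofList _).map _), pv_ofList_map]
  unfold pvStats
  rw [show (PySem.Dict.mk (((PySem.List.dedup (((data.flatMap (fun entry => ((PySem.Dict.mk entry).getD "tags" []))).filterMap pvEnt).map (·.1))).map (fun t => (t, pvInner ((data.flatMap (fun entry => ((PySem.Dict.mk entry).getD "tags" []))).filterMap pvEnt) t))))).items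
      = ((PySem.List.dedup (((data.flatMap (fun entry => ((PySem.Dict.mk entry).getD "tags" []))).filterMap pvEnt).map (·.1))).map (fun t => (t, pvInner ((data.flatMap (fun entry => ((PySem.Dict.mk entry).getD "tags" []))).filterMap pvEnt) t))) from rfl,
      List.map_map, pv_dedup_eq_ofList]
  apply List.map_congr_left
  intro t _
  simp [pvInner, PySem.Dict.getD_counter]
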